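-- pv_equiv track=rewrite | github.com/Esdras0106/PAMONHA | python/vetores.py/vetores_2/7.funcao.py | verificar_positivos_negativos
-- ===== SOURCE A (Python) =====
-- def verificar_positivos_negativos(lista):
--     soma_positiva = 0
--     negativos = 0
--     for numero in lista:
--         if numero < 0:
--             negativos +=1
--         else:
--             soma_positiva += numero
--     return negativos, soma_positiva
-- ===== SOURCE B (Python) =====
-- def verificar_positivos_negativos(lista):
--     ordenada = sorted(lista)
--     lo, hi = 0, len(ordenada)
--     while lo < hi:
--         meio = (lo + hi) // 2
--         if ordenada[meio] < 0:
--             lo = meio + 1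
--         else:
--             hi = meio
--     return lo, sum(ordenada[lo:])
-- ===== Notes on version B (the rewrite author's own statement) =====
-- stated objective: alternative
-- what changed: Sorts the list, finds the negative/non-negative boundary by hand-written binary search, and returns the boundary index as the negative count and the sum of the sorted suffix as the non-negative sum, instead of A's single fused two-accumulator loop.
import Mathlib
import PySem

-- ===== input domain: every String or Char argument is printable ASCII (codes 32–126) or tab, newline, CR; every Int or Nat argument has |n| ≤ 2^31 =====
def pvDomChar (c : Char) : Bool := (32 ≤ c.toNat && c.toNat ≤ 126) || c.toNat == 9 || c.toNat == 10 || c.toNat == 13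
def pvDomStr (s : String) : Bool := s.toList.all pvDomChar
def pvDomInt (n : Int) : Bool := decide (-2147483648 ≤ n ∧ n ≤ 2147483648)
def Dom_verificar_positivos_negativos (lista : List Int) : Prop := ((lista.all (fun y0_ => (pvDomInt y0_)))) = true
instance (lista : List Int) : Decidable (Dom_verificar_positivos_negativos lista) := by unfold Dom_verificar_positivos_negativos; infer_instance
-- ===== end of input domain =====

-- B sorts the list, binary-searches the negative/non-negative boundary and sums the sorted suffix, instead of A's single fused two-accumulator loop; different algorithm, not claimed faster.


-- ===== PORT A =====
def verificar_positivos_negativos (lista : List Int) : Int × Int :=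
  let st := lista.foldl (fun (st : Int × Int) numero =>
    if numero < 0 then (st.1, st.2 + 1) else (st.1 + numero, st.2)) (0, 0)
  (st.2, st.1)

-- ===== PORT B =====
-- midpoint bounds, needed by the while-loop's termination argument
lemma vpn_mid_bounds (lo hi : Int) (h : lo < hi) :
    lo ≤ PySem.Int.floordiv (lo + hi) 2 ∧ PySem.Int.floordiv (lo + hi) 2 < hi := by
  rw [PySem.Int.floordiv_eq_ediv_of_pos (by omega)]
  omega

-- the 'while lo < hi' binary-search loop of Source B; ordenada[meio] is pyGetD with default 0:
-- the entry always calls it with 0 ≤ lo ≤ hi ≤ len, so meio is in range and Python never raises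
def vpnBusca (ordenada : List Int) (lo hi : Int) : Int :=
  if h : lo < hi then
    let meio := PySem.Int.floordiv (lo + hi) 2
    if PySem.List.pyGetD ordenada meio 0 < 0 then
      vpnBusca ordenada (meio + 1) hi
    else
      vpnBusca ordenada lo meio
  else lo
termination_by (hi - lo).toNat
decreasing_by
  · have := vpn_mid_bounds lo hi h; omega
  · have := vpn_mid_bounds lo hi h; omega

def verificar_positivos_negativos_alt (lista : List Int) : Int × Int :=
  let ordenada := PySem.List.sorted lista (fun x => x) false
  let lo := vpnBusca ordenada 0 (ordenada.length : Int)
  (lo, (PySem.List.slice ordenada (some lo) none).sum)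

-- ===== PRECONDITION & SPEC =====
def Spec_verificar_positivos_negativos (lista : List Int) (out : Int × Int) : Prop := out = verificar_positivos_negativos_alt lista
instance (lista : List Int) (out : Int × Int) : Decidable (Spec_verificar_positivos_negativos lista out) := by unfold Spec_verificar_positivos_negativos; infer_instance

-- ===== CLAIM (what is proved, stated in full; the proofs are below) =====
def Claim_equal_verificar_positivos_negativos : Prop := ∀ (lista : List Int), Dom_verificar_positivos_negativos lista → Spec_verificar_positivos_negativos lista (verificar_positivos_negativos lista)

-- ===== LEMMAS AND PROOFS =====

-- A's fused fold computes (sum of non-negatives, count of negatives)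
lemma vp_fold (lista : List Int) (s n : Int) :
    lista.foldl (fun (st : Int × Int) numero =>
      if numero < 0 then (st.1, st.2 + 1) else (st.1 + numero, st.2)) (s, n)
    = (s + (lista.filter (fun x => 0 ≤ x)).sum, n + (lista.countP (fun x => x < 0) : Int)) := by
  induction lista generalizing s n with
  | nil => simp
  | cons h t ih =>
    by_cases hc : h < 0
    · simp [hc, ih, not_le.mpr hc]
      ring
    · simp [hc, ih, not_lt.mp hc]
      ring

-- on a sorted list with an all-negative prefix below lo and an all-non-negative suffix from hi,
-- the binary search returns the count of negatives
lemma vpnBusca_correct (s : List Int) (hp : s.Pairwise (· ≤ ·)) :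
    ∀ (fuel : Nat) (lo hi : Int), (hi - lo).toNat ≤ fuel →
    0 ≤ lo → lo ≤ hi → hi ≤ (s.length : Int) →
    (∀ (i : Nat) (hil : i < s.length), (i : Int) < lo → s[i] < 0) →
    (∀ (i : Nat) (hil : i < s.length), hi ≤ (i : Int) → 0 ≤ s[i]) →
    vpnBusca s lo hi = (s.countP (fun x => x < 0) : Int) := by
  have hmono : ∀ (i j : Nat) (hj : j < s.length) (hij : i ≤ j), s[i]'(by omega) ≤ s[j] := by
    intro i j hj hij
    rcases Nat.eq_or_lt_of_le hij with rfl | hlt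
    · exact le_refl _
    · exact (List.pairwise_iff_getElem.mp hp) i j (by omega) hj hlt
  intro fuel
  induction fuel with
  | zero =>
    intro lo hi hf h0 hle hlen hlow hhigh
    have hlohi : lo = hi := by omega
    subst hlohi
    rw [vpnBusca]
    simp only [lt_irrefl, dite_false]
    -- countP = lo.toNat : the first lo elements are the negatives, the rest non-negative
    have hsplit : s.countP (fun x => x < 0) = lo.toNat := by
      have h1 : s = s.take lo.toNat ++ s.drop lo.toNat := (List.take_append_drop _ _).symm
      rw [h1, List.countP_append]
      have htake : (s.take lo.toNat).countP (fun x => x < 0) = lo.toNat := by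
        rw [List.countP_eq_length.mpr, List.length_take]
        · omega
        · intro a ha
          obtain ⟨i, hi, rfl⟩ := List.getElem_of_mem ha
          have hil : i < s.length := by simp at hi; omega
          have : (s.take lo.toNat)[i] = s[i] := List.getElem_take
          rw [this]
          simpa using hlow i hil (by simp [List.length_take] at hi; omega)
      have hdrop : (s.drop lo.toNat).countP (fun x => x < 0) = 0 := by
        rw [List.countP_eq_zero]
        intro a ha
        obtain ⟨i, hi, rfl⟩ := List.getElem_of_mem ha
        have hx : lo.toNat + i < s.length := by simp at hi; omega
        have : (s.drop lo.toNat)[i] = s[lo.toNat + i]'hx := List.getElem_drop ..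
        rw [this]
        simpa using hhigh (lo.toNat + i) hx (by omega)
      omega
    rw [hsplit]; omega
  | succ m ih =>
    intro lo hi hf h0 hle hlen hlow hhigh
    by_cases h : lo < hi
    · rw [vpnBusca]
      simp only [h, dite_true]
      obtain ⟨hm1, hm2⟩ := vpn_mid_bounds lo hi h
      set meio := PySem.Int.floordiv (lo + hi) 2 with hmeio
      have hmr : meio.toNat < s.length := by omega
      have hget : PySem.List.pyGetD s meio 0 = s[meio.toNat]'hmr := by
        apply PySem.List.pyGetD_eq_getElem <;> omega
      rw [hget]
      by_cases hneg : s[meio.toNat] < 0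
      · simp only [hneg, if_true]
        exact ih (meio + 1) hi (by omega) (by omega) (by omega) hlen
          (fun i hil hi' => lt_of_le_of_lt (hmono i meio.toNat hmr (by omega)) hneg)
          hhigh
      · simp only [hneg, if_false]
        rw [not_lt] at hneg
        exact ih lo meio (by omega) h0 (by omega) (by omega) hlow
          (fun i hil hi' => le_trans hneg (hmono meio.toNat i hil (by omega)))
    · exact ih lo hi (by omega) h0 hle hlen hlow hhigh

-- dropping the negatives of a sorted list leaves exactly its non-negative elements
lemma sorted_drop_countP (s : List Int) (hp : s.Pairwise (· ≤ ·)) :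
    s.drop (s.countP (fun x => x < 0)) = s.filter (fun x => 0 ≤ x) := by
  induction s with
  | nil => simp
  | cons a t ih =>
    rw [List.pairwise_cons] at hp
    by_cases hc : a < 0
    · simp [hc, not_le.mpr hc, ih hp.2]
    · have hall : t.countP (fun x => x < 0) = 0 := by
        rw [List.countP_eq_zero]
        intro b hb
        simpa using not_lt.mpr (le_trans (not_lt.mp hc) (hp.1 b hb))
      have hfil : List.filter (fun x => decide (0 ≤ x)) t = t :=
        List.filter_eq_self.mpr (fun b hb => decide_eq_true (le_trans (not_lt.mp hc) (hp.1 b hb)))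
      simp [hc, hall, not_lt.mp hc, hfil]

-- ===== VERDICT (by name: the statement is the Claim_ definition above) =====
theorem verificar_positivos_negativos_spec : Claim_equal_verificar_positivos_negativos := by
  intro lista _
  unfold Spec_verificar_positivos_negativos verificar_positivos_negativos verificar_positivos_negativos_alt
  simp only [vp_fold, zero_add]
  set s := PySem.List.sorted lista (fun x => x) false with hs
  have hperm : s.Perm lista := PySem.List.sorted_perm ..
  have hp : s.Pairwise (· ≤ ·) := PySem.List.sorted_pairwise ..
  have hbs : vpnBusca s 0 (s.length : Int) = (s.countP (fun x => x < 0) : Int) :=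
    vpnBusca_correct s hp (s.length : Int).toNat 0 (s.length : Int) (by omega)
      (le_refl 0) (by omega) (le_refl _)
      (fun i hil hi' => absurd hi' (by omega))
      (fun i hil hi' => absurd hi' (by omega))
  rw [hbs, PySem.List.slice_from_natCast, sorted_drop_countP s hp,
    hperm.countP_eq, (hperm.filter _).sum_eq]
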